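-- pv_equiv track=rewrite | github.com/nanometre380/Algorithms | baekjoon/구현/2503.py | count_baseball
-- ===== SOURCE A (Python) =====
-- from itertools import permutations
--
-- def check_baseball(number, q) :
--     s = 0
--     b = 0
--     for i in range(len(q)) :
--         if q[i] == number[i] :
--             s += 1
--         elif q[i] in number :
--             b += 1
--     return s, b
--
-- def count_baseball(questions) :
--     numbers = [str(i) for i in range(1, 10)]
--     cases = list(permutations(numbers, 3))
--     for q, s, b in questions :
--         temp = []
--         for case in cases :
--             s2, b2 = check_baseball(case, q)
--             if s == str(s2) and b == str(b2) :
--                 temp.append(case)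
--         cases = list(set(temp))
--     return len(cases)
-- ===== SOURCE B (Python) =====
-- def clue_matches(cand, q, s, b):
--     strikes = 0
--     balls = 0
--     for i in range(len(q)):
--         if q[i] == cand[i]:
--             strikes += 1
--         elif q[i] in cand:
--             balls += 1
--     return s == str(strikes) and b == str(balls)
--
--
-- def count_baseball(questions):
--     digits = "123456789"
--     count = 0
--     for a in digits:
--         for b in digits:
--             for c in digits:
--                 if a == b or a == c or b == c:
--                     continue
--                 if all(clue_matches((a, b, c), q, s, bb) for q, s, bb in questions):
--                     count += 1
--     return count
-- ===== Notes on version B (the rewrite author's own statement) =====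
-- stated objective: alternative
-- what changed: B drops A's iteratively shrinking candidate set (per-question filter + list(set(...)) rebuild over itertools.permutations) and instead makes one counting pass over the 9x9x9 digit triples, skipping repeated digits and counting a triple iff it matches every (q,s,b) clue.
import Mathlib
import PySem

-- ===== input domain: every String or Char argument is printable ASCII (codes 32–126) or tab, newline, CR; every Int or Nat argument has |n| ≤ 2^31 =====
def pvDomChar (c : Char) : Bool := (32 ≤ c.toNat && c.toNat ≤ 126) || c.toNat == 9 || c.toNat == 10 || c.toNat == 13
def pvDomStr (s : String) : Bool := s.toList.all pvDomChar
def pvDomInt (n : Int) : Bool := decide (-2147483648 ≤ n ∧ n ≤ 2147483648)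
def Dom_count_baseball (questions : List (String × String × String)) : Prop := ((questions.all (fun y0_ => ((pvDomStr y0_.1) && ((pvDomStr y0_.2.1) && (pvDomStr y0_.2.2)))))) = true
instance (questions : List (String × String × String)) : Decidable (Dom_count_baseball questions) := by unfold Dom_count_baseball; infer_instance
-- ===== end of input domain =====

-- B replaces A's iteratively shrinking candidate set (filter + set() rebuild per clue) by a
-- single counting pass over all 9x9x9 digit triples; same cost class, no speed claim.


-- ===== PORT A =====
-- Python's one-character digit strings (and the characters q[i] of a guess) are modeled as Char;
-- equality and tuple membership on one-character strings coincide with Char equality/membership.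
-- check_baseball(number, q): the loop 'for i in range(len(q))' with q[i]/number[i]; number[i]
-- raises IndexError when len(q) > 3 (the match's none branch; excluded by Pre_ below).
def pvCheckBaseball (number : List Char) (q : List Char) : Int × Int :=
  (PySem.List.pyRange 0 (q.length : Int) 1).foldl
    (fun (sb : Int × Int) i =>
      match PySem.List.pyGet? q i, PySem.List.pyGet? number i with
      | some qi, some ni =>
        if qi = ni then (sb.1 + 1, sb.2)
        else if qi ∈ number then (sb.1, sb.2 + 1)
        else sb
      | _, _ => sb)
    ((0 : Int), (0 : Int))

def count_baseball (questions : List (String × String × String)) : Int :=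
  -- numbers = [str(i) for i in range(1, 10)] : nine one-character digit strings (as Char)
  let numbers : List Char := (PySem.List.pyRange 1 10 1).map (fun i => (PySem.Int.toChars i).headI)
  -- cases = list(permutations(numbers, 3))
  let cases0 := PySem.List.permutations numbers 3
  let final := questions.foldl
    (fun cases qsb =>
      let temp := cases.filter (fun case =>
        let r := pvCheckBaseball case qsb.1.toList
        qsb.2.1 == PySem.Int.toStr r.1 && qsb.2.2 == PySem.Int.toStr r.2)
      -- cases = list(set(temp)): only the final length is used, so set order does not matter
      PySem.Set.ofList temp)
    cases0
  (final.length : Int)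

-- ===== PORT B =====
-- clue_matches(cand, q, s, b) from Source B: same strike/ball loop, then the string comparison
def pvClueMatches (cand : List Char) (q s b : String) : Bool :=
  let r := (PySem.List.pyRange 0 (q.toList.length : Int) 1).foldl
    (fun (sb : Int × Int) i =>
      match PySem.List.pyGet? q.toList i, PySem.List.pyGet? cand i with
      | some qi, some ni =>
        if qi = ni then (sb.1 + 1, sb.2)
        else if qi ∈ cand then (sb.1, sb.2 + 1)
        else sb
      | _, _ => sb)
    ((0 : Int), (0 : Int))
  s == PySem.Int.toStr r.1 && b == PySem.Int.toStr r.2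

def count_baseball_alt (questions : List (String × String × String)) : Int :=
  "123456789".toList.foldl (fun cnt a =>
    "123456789".toList.foldl (fun cnt b =>
      "123456789".toList.foldl (fun cnt c =>
        if a = b ∨ a = c ∨ b = c then cnt
        else if questions.all (fun qsb => pvClueMatches [a, b, c] qsb.1 qsb.2.1 qsb.2.2) then cnt + 1
        else cnt) cnt) cnt) (0 : Int)

-- ===== PRECONDITION & SPEC =====
-- helper for Pre_ only (independent of both ports): does candidate (a,b,c) match clue t,
-- with strikes/balls computed positionally over the zip of the guess with the candidate
-- (faithful to Python for guesses of length ≤ 3, the only ones Pre_ applies it to)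
def pvDigits : List Char := "123456789".toList
def pvPreMatch (a b c : Char) (t : String × String × String) : Bool :=
  let cand := [a, b, c]
  let pairs := t.1.toList.zip cand
  let strikes := pairs.countP (fun p => p.1 == p.2)
  let balls := pairs.countP (fun p => p.1 != p.2 && cand.contains p.1)
  t.2.1 == PySem.Int.toStr (strikes : Int) && t.2.2 == PySem.Int.toStr (balls : Int)

-- Pre_ excludes exactly the inputs on which the Python A raises IndexError (a guess longer
-- than 3 characters reached while some candidate of three distinct digits still survives all
-- earlier clues); B's Python raises IndexError on exactly the same inputs, and both return
-- everywhere else.  Closed form: for every index k whose guess is longer than 3 characters,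
-- every distinct-digit triple must be refuted by some clue before k.
def pvPreCheck (questions : List (String × String × String)) : Bool :=
  (List.range questions.length).all fun k =>
    !((questions.getD k ("", "", "")).1.toList.length > 3 : Bool) ||
      (pvDigits.all fun a => pvDigits.all fun b => pvDigits.all fun c =>
        (a == b || a == c || b == c) ||
          (List.range k).any fun j => !pvPreMatch a b c (questions.getD j ("", "", "")))
def Pre_count_baseball (questions : List (String × String × String)) : Prop :=
  pvPreCheck questions = true
instance (questions : List (String × String × String)) : Decidable (Pre_count_baseball questions) := by
  unfold Pre_count_baseball; infer_instance
def pvWitness_count_baseball : (List (String × String × String)) := [("123", "3", "0")]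

def Spec_count_baseball (questions : List (String × String × String)) (out : Int) : Prop := out = count_baseball_alt questions
instance (questions : List (String × String × String)) (out : Int) : Decidable (Spec_count_baseball questions out) := by unfold Spec_count_baseball; infer_instance

-- ===== CLAIM (what is proved, stated in full; the proofs are below) =====
def Claim_equal_count_baseball : Prop := ∀ (questions : List (String × String × String)), Dom_count_baseball questions → Pre_count_baseball questions → Spec_count_baseball questions (count_baseball questions)

-- ===== LEMMAS AND PROOFS =====

-- the common clue predicate both ports filter/count with
def pvOk (qsb : String × String × String) (case : List Char) : Bool :=
  pvClueMatches case qsb.1 qsb.2.1 qsb.2.2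

-- value-level view of permutations(digits, 3) (proved equal to the port's list by decide below)
def pvPerms3 (xs : List Char) : List (List Char) :=
  xs.flatMap fun a => (xs.filter (fun x => x != a)).flatMap fun b =>
    ((xs.filter (fun x => x != a)).filter (fun x => x != b)).map fun c => [a, b, c]

theorem pvNodupPerms {α : Type} [DecidableEq α] :
    ∀ (r : Nat) (xs : List α), xs.Nodup → (PySem.List.permutations xs r).Nodup
  | 0, xs, _ => by simp [PySem.List.permutations]
  | r + 1, xs, h => by
    rw [PySem.List.permutations, List.nodup_flatMap]
    refine ⟨?_, ?_⟩
    · intro i hi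
      simp only [List.mem_range] at hi
      rw [List.getElem?_eq_getElem hi]
      exact (pvNodupPerms r _ (h.eraseIdx i)).map
        (fun a b hb => by simpa using congrArg List.tail hb)
    · rw [List.pairwise_iff_getElem]
      intro i j hi hj hij
      simp only [List.length_range] at hi hj
      simp only [List.getElem_range]
      unfold Function.onFun
      simp only [List.getElem?_eq_getElem hi, List.getElem?_eq_getElem hj]
      intro p hp hq
      simp only [List.mem_map] at hp hq
      obtain ⟨p1, _, hp2⟩ := hp
      obtain ⟨q1, _, hq2⟩ := hq
      have heq : xs[i] = xs[j] := ((List.cons.injEq _ _ _ _ ▸ hp2.trans hq2.symm).1)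
      have := h.getElem_inj_iff.mp heq
      omega

-- A's question fold, on a duplicate-free candidate list, is one overall filter
theorem pvFoldFilter (qs : List (String × String × String)) :
    ∀ (cs : List (List Char)), cs.Nodup →
      qs.foldl (fun cases qsb =>
          PySem.Set.ofList (cases.filter (fun case =>
            qsb.2.1 == PySem.Int.toStr (pvCheckBaseball case qsb.1.toList).1 &&
            qsb.2.2 == PySem.Int.toStr (pvCheckBaseball case qsb.1.toList).2))) cs
        = cs.filter (fun case => qs.all (fun qsb => pvOk qsb case)) := by
  induction qs with
  | nil => intro cs h; simp
  | cons q qs ih =>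
    intro cs h
    rw [List.foldl_cons,
      PySem.Set.ofList_eq_self_of_nodup _ (h.filter _),
      ih _ (h.filter _), List.filter_filter]
    refine List.filter_congr (fun c _ => ?_)
    show (qs.all (fun qsb => pvOk qsb c) && pvOk q c)
        = (q :: qs).all (fun qsb => pvOk qsb c)
    simp [Bool.and_comm]

-- B's innermost loop when the two leading digits repeat: nothing is counted
theorem pvFoldC_self (f : List Char → Bool) (a : Char) :
    ∀ (zs : List Char) (cnt : Int),
      zs.foldl (fun cnt c => if a = a ∨ a = c ∨ a = c then cnt
        else if f [a, a, c] then cnt + 1 else cnt) cnt = cnt := by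
  intro zs cnt
  induction zs generalizing cnt with
  | nil => rfl
  | cons z zs ih => simpa using ih cnt

-- B's innermost loop counts the filtered c-candidates
theorem pvFoldC (f : List Char → Bool) (a b : Char) (hab : a ≠ b) :
    ∀ (zs : List Char) (cnt : Int),
      zs.foldl (fun cnt c => if a = b ∨ a = c ∨ b = c then cnt
          else if f [a, b, c] then cnt + 1 else cnt) cnt
        = cnt + ((((zs.filter (fun x => x != a)).filter (fun x => x != b)).filter
            (fun c => f [a, b, c])).length : Int) := by
  intro zs
  induction zs with
  | nil => intro cnt; simp
  | cons z zs ih =>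
    intro cnt
    rw [List.foldl_cons]
    by_cases hza : a = z
    · rw [if_pos (Or.inr (Or.inl hza)), ih cnt]
      have h1 : (z != a) = false := by simp [hza]
      rw [List.filter_cons, h1]
      simp
    · by_cases hzb : b = z
      · rw [if_pos (Or.inr (Or.inr hzb)), ih cnt]
        have h1 : (z != a) = true := by simp [Ne.symm hza]
        have h2 : (z != b) = false := by simp [hzb]
        rw [List.filter_cons, h1]
        simp only [if_true]
        rw [List.filter_cons, h2]
        simp
      · have h1 : (z != a) = true := by simp [Ne.symm hza]
        have h2 : (z != b) = true := by simp [Ne.symm hzb]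
        rw [if_neg (by simp [hab, hza, hzb])]
        by_cases hf : f [a, b, z]
        · rw [if_pos hf, ih]
          simp only [List.filter_cons, h1, h2, if_true, hf, List.length_cons]
          push_cast
          ring
        · rw [if_neg hf, ih]
          simp [h1, h2, hf]

-- B's middle loop
theorem pvFoldB (f : List Char → Bool) (a : Char) (zs : List Char) :
    ∀ (ys : List Char) (cnt : Int),
      ys.foldl (fun cnt b =>
          zs.foldl (fun cnt c => if a = b ∨ a = c ∨ b = c then cnt
            else if f [a, b, c] then cnt + 1 else cnt) cnt) cnt
        = cnt + (((ys.filter (fun x => x != a)).flatMap (fun b =>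
            (((zs.filter (fun x => x != a)).filter (fun x => x != b)).filter
              (fun c => f [a, b, c])))).length : Int) := by
  intro ys
  induction ys with
  | nil => intro cnt; simp
  | cons y ys ih =>
    intro cnt
    rw [List.foldl_cons]
    by_cases hya : a = y
    · subst hya
      rw [pvFoldC_self f a zs cnt, ih]
      simp
    · have h1 : (y != a) = true := by simp [Ne.symm hya]
      rw [pvFoldC f a y hya zs cnt, ih]
      simp only [List.filter_cons, h1, if_true, List.flatMap_cons,
        List.length_append]
      push_cast
      ring

-- B's outer loop
theorem pvFoldA (f : List Char → Bool) (zs : List Char) :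
    ∀ (xs : List Char) (cnt : Int),
      xs.foldl (fun cnt a =>
          zs.foldl (fun cnt b =>
            zs.foldl (fun cnt c => if a = b ∨ a = c ∨ b = c then cnt
              else if f [a, b, c] then cnt + 1 else cnt) cnt) cnt) cnt
        = cnt + ((xs.flatMap (fun a => (zs.filter (fun x => x != a)).flatMap (fun b =>
            (((zs.filter (fun x => x != a)).filter (fun x => x != b)).filter
              (fun c => f [a, b, c]))))).length : Int) := by
  intro xs
  induction xs with
  | nil => intro cnt; simp
  | cons x xs ih =>
    intro cnt
    rw [List.foldl_cons, pvFoldB f x zs zs cnt, ih]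
    simp only [List.flatMap_cons, List.length_append]
    push_cast
    ring

-- filtering the triples [a,b,c] of pvPerms3 is filtering the c-lists pointwise (same length)
theorem pvPerms3_filter_len (f : List Char → Bool) (xs : List Char) :
    ((pvPerms3 xs).filter f).length
      = (xs.flatMap (fun a => (xs.filter (fun x => x != a)).flatMap (fun b =>
          (((xs.filter (fun x => x != a)).filter (fun x => x != b)).filter
            (fun c => f [a, b, c]))))).length := by
  simp [pvPerms3, List.filter_flatMap, List.length_flatMap, Function.comp,
    List.filter_map, List.length_map]

set_option maxRecDepth 10000 in
theorem pvPerms3_eq_permutations :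
    PySem.List.permutations "123456789".toList 3 = pvPerms3 "123456789".toList := by decide

set_option maxRecDepth 10000 in
theorem pvNumbers_eq :
    ((PySem.List.pyRange 1 10 1).map (fun i => (PySem.Int.toChars i).headI))
      = "123456789".toList := by decide

-- ===== VERDICT (by name: the statement is the Claim_ definition above) =====
set_option maxHeartbeats 400000 in
theorem count_baseball_spec : Claim_equal_count_baseball := by
  intro questions _ _
  unfold Spec_count_baseball
  simp only [count_baseball, count_baseball_alt]
  rw [pvNumbers_eq]
  rw [pvFoldFilter questions _
    (pvNodupPerms 3 "123456789".toList (by decide))]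
  rw [pvFoldA (fun cand => questions.all (fun qsb => pvClueMatches cand qsb.1 qsb.2.1 qsb.2.2))
    "123456789".toList "123456789".toList 0]
  rw [pvPerms3_eq_permutations]
  rw [pvPerms3_filter_len]
  simp only [pvOk, zero_add]
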